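-- pv_equiv track=rewrite | github.com/onrona/earthcare-data-downloader | earthcare_downloader.py | string_to_product_name
-- ===== SOURCE A (Python) =====
-- def string_to_product_name(input_string):
--     """Convert user input string to valid EarthCARE product name."""
--     product_name_input = input_string.replace(' ','').replace('-','').replace('_','').lower()
--
--     file_types = [
--         # ATLID level 1b
--         'ATL_NOM_1B',
--         'ATL_DCC_1B',
--         'ATL_CSC_1B',
--         'ATL_FSC_1B',
--         # MSI level 1b
--         'MSI_NOM_1B',
--         'MSI_BBS_1B',
--         'MSI_SD1_1B',
--         'MSI_SD2_1B',
--         # BBR level 1b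
--         'BBR_NOM_1B',
--         'BBR_SNG_1B',
--         'BBR_SOL_1B',
--         'BBR_LIN_1B',
--         # CPR level 1b  #@ JAXA product
--         'CPR_NOM_1B',   #@ JAXA product
--         # MSI level 1c
--         'MSI_RGR_1C',
--         # level 1d
--         'AUX_MET_1D',
--         'AUX_JSG_1D',
--         # ATLID level 2a
--         'ATL_FM__2A',
--         'ATL_AER_2A',
--         'ATL_ICE_2A',
--         'ATL_TC__2A',
--         'ATL_EBD_2A',
--         'ATL_CTH_2A',
--         'ATL_ALD_2A',
--         # MSI level 2a
--         'MSI_CM__2A',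
--         'MSI_COP_2A',
--         'MSI_AOT_2A',
--         # CPR level 2a
--         'CPR_FMR_2A',
--         'CPR_CD__2A',
--         'CPR_TC__2A',
--         'CPR_CLD_2A',
--         'CPR_APC_2A',
--         # ATLID-MSI level 2b
--         'AM__MO__2B',
--         'AM__CTH_2B',
--         'AM__ACD_2B',
--         # ATLID-CPR level 2b
--         'AC__TC__2B',
--         # BBR-MSI-(ATLID) level 2b
--         'BM__RAD_2B',
--         'BMA_FLX_2B',
--         # ATLID-CPR-MSI level 2b
--         'ACM_CAP_2B',
--         'ACM_COM_2B',
--         'ACM_RT__2B',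
--         # ATLID-CPR-MSI-BBR
--         'ALL_DF__2B',
--         'ALL_3D__2B',
--         # Orbit data    #@ Orbit files in Auxiliary data collection
--         'MPL_ORBSCT',   #@ orbit scenario file
--         'AUX_ORBPRE',   #@ predicted orbit file
--         'AUX_ORBRES',   #@ restituted/reconstructed orbit file
--     ]
--
--     short_names = []
--
--     for file_type in file_types:
--         long_name = file_type.replace('_', '').lower()
--         medium_name = long_name[0:-2]
--         short_name = medium_name
--         string_replacements = [('atl', 'a'), ('msi', 'm'), ('bbr', 'b'), ('cpr', 'c'), ('aux', 'x')]
--         for old_string, new_string in string_replacements: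
--             short_name = short_name.replace(old_string, new_string)
--
--         expected_inputs = [long_name, medium_name, short_name]
--
--         if 'ALL_' == file_type[0:4]:
--             alternative_long_name = 'acmb' + long_name[3:]
--             alternative_short_name = 'acmb' + short_name[3:]
--             expected_inputs.extend([alternative_long_name, alternative_short_name])
--
--         if product_name_input in expected_inputs:
--             return file_type
--
--         short_names.append(short_name.upper())
--
--     msg = ''
--     msg2 = ''
--     for i in range(len(file_types)):
--         if i % 6 == 0:
--             msg += '\n' + file_types[i]
--             msg2 += '\n' + short_names[i]
--         else:
--             msg += '\t' + file_types[i]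
--             msg2 += '\t' + short_names[i]
--
--     raise ValueError(f'The user input "{input_string}" is either not a valid product name or not supported by this function.\n' + msg + '\n\nor use the respective short forms (additional non letter characters like - or _ are also allowed, e.g. A-NOM):\n' + msg2)
-- ===== SOURCE B (Python) =====
-- _FILE_TYPES = [
--     'ATL_NOM_1B', 'ATL_DCC_1B', 'ATL_CSC_1B', 'ATL_FSC_1B',
--     'MSI_NOM_1B', 'MSI_BBS_1B', 'MSI_SD1_1B', 'MSI_SD2_1B',
--     'BBR_NOM_1B', 'BBR_SNG_1B', 'BBR_SOL_1B', 'BBR_LIN_1B',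
--     'CPR_NOM_1B',
--     'MSI_RGR_1C',
--     'AUX_MET_1D', 'AUX_JSG_1D',
--     'ATL_FM__2A', 'ATL_AER_2A', 'ATL_ICE_2A', 'ATL_TC__2A',
--     'ATL_EBD_2A', 'ATL_CTH_2A', 'ATL_ALD_2A',
--     'MSI_CM__2A', 'MSI_COP_2A', 'MSI_AOT_2A',
--     'CPR_FMR_2A', 'CPR_CD__2A', 'CPR_TC__2A', 'CPR_CLD_2A', 'CPR_APC_2A',
--     'AM__MO__2B', 'AM__CTH_2B', 'AM__ACD_2B',
--     'AC__TC__2B',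
--     'BM__RAD_2B', 'BMA_FLX_2B',
--     'ACM_CAP_2B', 'ACM_COM_2B', 'ACM_RT__2B',
--     'ALL_DF__2B', 'ALL_3D__2B',
--     'MPL_ORBSCT', 'AUX_ORBPRE', 'AUX_ORBRES',
-- ]
--
--
-- def _build_tables():
--     """Build the normalized-form -> file_type lookup once, plus the short names."""
--     lookup = {}
--     short_names = []
--     for file_type in _FILE_TYPES:
--         long_name = file_type.replace('_', '').lower()
--         medium_name = long_name[:-2]
--         short_name = medium_name
--         for old, new in (('atl', 'a'), ('msi', 'm'), ('bbr', 'b'), ('cpr', 'c'), ('aux', 'x')):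
--             short_name = short_name.replace(old, new)
--         forms = [long_name, medium_name, short_name]
--         if file_type.startswith('ALL_'):
--             forms += ['acmb' + long_name[3:], 'acmb' + short_name[3:]]
--         for form in forms:
--             lookup.setdefault(form, file_type)
--         short_names.append(short_name.upper())
--     return lookup, short_names
--
--
-- _LOOKUP, _SHORT_NAMES = _build_tables()
--
--
-- def string_to_product_name(input_string):
--     """Convert user input string to valid EarthCARE product name."""
--     normalized = input_string.replace(' ', '').replace('-', '').replace('_', '').lower()
--     if normalized in _LOOKUP:
--         return _LOOKUP[normalized]
--
--     msg = ''
--     msg2 = ''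
--     for i, (file_type, short_name) in enumerate(zip(_FILE_TYPES, _SHORT_NAMES)):
--         sep = '\n' if i % 6 == 0 else '\t'
--         msg += sep + file_type
--         msg2 += sep + short_name
--
--     raise ValueError(f'The user input "{input_string}" is either not a valid product name or not supported by this function.\n' + msg + '\n\nor use the respective short forms (additional non letter characters like - or _ are also allowed, e.g. A-NOM):\n' + msg2)
-- ===== Notes on version B (the rewrite author's own statement) =====
-- stated objective: simpler
-- what changed: A recomputes long/medium/short name forms for every file type on each call and scans until one matches; B builds a normalized-form -> product-name lookup dict once at module load (setdefault so the first-listed product wins) and the function body is a single dict lookup, reconstructing the identical ValueError message on a miss.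
import Mathlib
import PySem

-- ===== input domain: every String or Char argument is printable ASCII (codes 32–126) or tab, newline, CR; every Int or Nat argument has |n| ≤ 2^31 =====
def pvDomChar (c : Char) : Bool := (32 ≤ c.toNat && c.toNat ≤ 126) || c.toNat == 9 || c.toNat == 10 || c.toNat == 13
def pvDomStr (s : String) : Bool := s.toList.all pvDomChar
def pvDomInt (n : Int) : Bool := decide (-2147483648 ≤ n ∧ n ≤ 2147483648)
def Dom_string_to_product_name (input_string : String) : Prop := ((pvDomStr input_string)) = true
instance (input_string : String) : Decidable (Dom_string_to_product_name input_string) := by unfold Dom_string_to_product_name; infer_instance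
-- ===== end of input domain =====

-- B replaces A's per-call scan (recomputing every name form until one matches) by a lookup
-- table from normalized form to product name, built once; equivalence is about the RETURN
-- value on inputs where A returns (Pre_ excludes the inputs on which A raises ValueError).

-- shared table constants and the normalization both Pythons apply to the user input
def pvFileTypes : List String := [
  "ATL_NOM_1B", "ATL_DCC_1B", "ATL_CSC_1B", "ATL_FSC_1B", "MSI_NOM_1B", "MSI_BBS_1B",
  "MSI_SD1_1B", "MSI_SD2_1B", "BBR_NOM_1B", "BBR_SNG_1B", "BBR_SOL_1B", "BBR_LIN_1B",
  "CPR_NOM_1B", "MSI_RGR_1C", "AUX_MET_1D", "AUX_JSG_1D", "ATL_FM__2A", "ATL_AER_2A",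
  "ATL_ICE_2A", "ATL_TC__2A", "ATL_EBD_2A", "ATL_CTH_2A", "ATL_ALD_2A", "MSI_CM__2A",
  "MSI_COP_2A", "MSI_AOT_2A", "CPR_FMR_2A", "CPR_CD__2A", "CPR_TC__2A", "CPR_CLD_2A",
  "CPR_APC_2A", "AM__MO__2B", "AM__CTH_2B", "AM__ACD_2B", "AC__TC__2B", "BM__RAD_2B",
  "BMA_FLX_2B", "ACM_CAP_2B", "ACM_COM_2B", "ACM_RT__2B", "ALL_DF__2B", "ALL_3D__2B",
  "MPL_ORBSCT", "AUX_ORBPRE", "AUX_ORBRES"]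

def pvReplacements : List (String × String) :=
  [("atl", "a"), ("msi", "m"), ("bbr", "b"), ("cpr", "c"), ("aux", "x")]

def pvNormalize (s : String) : String :=
  PySem.Str.lower (PySem.Str.replace (PySem.Str.replace (PySem.Str.replace s " " "") "-" "") "_" "")

-- ===== PORT A =====
-- A's loop over file_types: compute long/medium/short names, return the file type on the
-- first match; fall-through = the raise ValueError path = none (excluded by Pre_).
def pvALoop (p : String) : List String → Option String
  | [] => none
  | ft :: rest =>
    let longName := PySem.Str.lower (PySem.Str.replace ft "_" "")
    let mediumName := PySem.Str.slice longName (some 0) (some (-2))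
    let shortName := pvReplacements.foldl (fun s pr => PySem.Str.replace s pr.1 pr.2) mediumName
    let expectedInputs := [longName, mediumName, shortName] ++
      (if PySem.Str.slice ft (some 0) (some 4) = "ALL_" then
        ["acmb" ++ PySem.Str.slice longName (some 3) none,
         "acmb" ++ PySem.Str.slice shortName (some 3) none]
      else [])
    if p ∈ expectedInputs then some ft else pvALoop p rest

def string_to_product_name (input_string : String) : String :=
  (pvALoop (pvNormalize input_string) pvFileTypes).getD ""

-- ===== PORT B =====
-- Source B's _build_tables: one dict built with setdefault mapping every accepted form to its
-- file type (the short_names list of Source B feeds only the raise path, which Pre_ excludes).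
def pvLookup : PySem.Dict String String :=
  pvFileTypes.foldl (fun d ft =>
    let longName := PySem.Str.lower (PySem.Str.replace ft "_" "")
    let mediumName := PySem.Str.slice longName (some 0) (some (-2))
    let shortName := pvReplacements.foldl (fun s pr => PySem.Str.replace s pr.1 pr.2) mediumName
    let forms := [longName, mediumName, shortName] ++
      (if PySem.Str.startswith ft "ALL_" then
        ["acmb" ++ PySem.Str.slice longName (some 3) none,
         "acmb" ++ PySem.Str.slice shortName (some 3) none]
      else [])
    forms.foldl (fun d f => d.setdefault f ft) d) PySem.Dict.empty

-- 'if normalized in _LOOKUP: return _LOOKUP[normalized]'; else Source B raises (excluded by Pre_)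
def pvBGet (n : String) : String :=
  match pvLookup.get? n with
  | some ft => ft
  | none => ""

def string_to_product_name_alt (input_string : String) : String :=
  pvBGet (pvNormalize input_string)

-- ===== PRECONDITION & SPEC =====
-- Pre_ = exactly the inputs on which A returns: the normalized input is one of the 127
-- accepted forms (long/medium/short names plus the two acmb forms of each ALL_ type);
-- on every other input A raises ValueError.
def pvAcceptedKeys : List String := [
  "atlnom1b", "atlnom", "anom", "atldcc1b", "atldcc", "adcc",
  "atlcsc1b", "atlcsc", "acsc", "atlfsc1b", "atlfsc", "afsc",
  "msinom1b", "msinom", "mnom", "msibbs1b", "msibbs", "mbbs",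
  "msisd11b", "msisd1", "msd1", "msisd21b", "msisd2", "msd2",
  "bbrnom1b", "bbrnom", "bnom", "bbrsng1b", "bbrsng", "bsng",
  "bbrsol1b", "bbrsol", "bsol", "bbrlin1b", "bbrlin", "blin",
  "cprnom1b", "cprnom", "cnom", "msirgr1c", "msirgr", "mrgr",
  "auxmet1d", "auxmet", "xmet", "auxjsg1d", "auxjsg", "xjsg",
  "atlfm2a", "atlfm", "afm", "atlaer2a", "atlaer", "aaer",
  "atlice2a", "atlice", "aice", "atltc2a", "atltc", "atc",
  "atlebd2a", "atlebd", "aebd", "atlcth2a", "atlcth", "acth",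
  "atlald2a", "atlald", "aald", "msicm2a", "msicm", "mcm",
  "msicop2a", "msicop", "mcop", "msiaot2a", "msiaot", "maot",
  "cprfmr2a", "cprfmr", "cfmr", "cprcd2a", "cprcd", "ccd",
  "cprtc2a", "cprtc", "ctc", "cprcld2a", "cprcld", "ccld",
  "cprapc2a", "cprapc", "capc", "ammo2b", "ammo", "amcth2b",
  "amcth", "amacd2b", "amacd", "actc2b", "actc", "bmrad2b",
  "bmrad", "bmaflx2b", "bmaflx", "acmcap2b", "acmcap", "acmcom2b",
  "acmcom", "acmrt2b", "acmrt", "alldf2b", "alldf", "acmbdf2b",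
  "acmbdf", "all3d2b", "all3d", "acmb3d2b", "acmb3d", "mplorbsct",
  "mplorbs", "auxorbpre", "auxorbp", "xorbp", "auxorbres", "auxorbr",
  "xorbr"]

def Pre_string_to_product_name (input_string : String) : Prop :=
  pvNormalize input_string ∈ pvAcceptedKeys
instance (input_string : String) : Decidable (Pre_string_to_product_name input_string) := by
  unfold Pre_string_to_product_name; infer_instance

def pvWitness_string_to_product_name : String := "A-NOM"

def Spec_string_to_product_name (input_string : String) (out : String) : Prop := out = string_to_product_name_alt input_string
instance (input_string : String) (out : String) : Decidable (Spec_string_to_product_name input_string out) := by unfold Spec_string_to_product_name; infer_instance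

-- ===== CLAIM (what is proved, stated in full; the proofs are below) =====
def Claim_equal_string_to_product_name : Prop := ∀ (input_string : String), Dom_string_to_product_name input_string → Pre_string_to_product_name input_string → Spec_string_to_product_name input_string (string_to_product_name input_string)

-- ===== LEMMAS AND PROOFS =====
-- Both ports depend on the input only through its normalized form, so it suffices to
-- check the two table computations on each of the 127 accepted forms.
set_option maxRecDepth 100000 in
set_option maxHeartbeats 4000000 in
theorem pvKeyAgree : ∀ n ∈ pvAcceptedKeys, (pvALoop n pvFileTypes).getD "" = pvBGet n := by
  decide

-- ===== VERDICT (by name: the statement is the Claim_ definition above) =====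
theorem string_to_product_name_spec : Claim_equal_string_to_product_name := by
  intro s _ hpre
  exact pvKeyAgree (pvNormalize s) hpre
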